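-- pv_equiv track=rewrite | github.com/nguemechieu/sopotek-trading-ai | src/backtesting/optimizer.py | _param_rows
-- ===== SOURCE A (Python) =====
-- import itertools
--
-- def _param_rows(param_grid):
--     keys = list(param_grid.keys())
--     values = [list(param_grid[key]) for key in keys]
--     for combo in itertools.product(*values):
--         params = dict(zip(keys, combo))
--         if params.get("ema_fast", 0) >= params.get("ema_slow", 0):
--             continue
--         yield params
-- ===== SOURCE B (Python) =====
-- def _param_rows(param_grid):
--     # Depth-first backtracking over the keys: assign one key per level; as soon as both
--     # "ema_fast" and "ema_slow" are bound with fast >= slow, prune the whole subtree.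
--     # The constraint check is interleaved into the search instead of a generate-then-filter.
--     items = list(param_grid.items())
--
--     def first_bound(pairs, key):
--         for k, v in pairs:
--             if k == key:
--                 return v
--         return None
--
--     def search(i, bound):
--         if i == len(items):
--             f = first_bound(bound, "ema_fast")
--             s = first_bound(bound, "ema_slow")
--             if (0 if f is None else f) < (0 if s is None else s):
--                 yield dict(bound)
--             return
--         key, vals = items[i]
--         for v in list(vals):
--             nb = bound + [(key, v)]
--             f = first_bound(nb, "ema_fast")
--             s = first_bound(nb, "ema_slow")
--             if f is not None and s is not None and f >= s:
--                 continue  # every completion of nb is rejected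
--             yield from search(i + 1, nb)
--
--     yield from search(0, [])
-- ===== Notes on version B (the rewrite author's own statement) =====
-- stated objective: alternative
-- what changed: Replaces itertools.product enumeration plus a post-hoc filter by a depth-first backtracking search over the keys that prunes a whole subtree as soon as both ema_fast and ema_slow are bound with fast >= slow.
import Mathlib
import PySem

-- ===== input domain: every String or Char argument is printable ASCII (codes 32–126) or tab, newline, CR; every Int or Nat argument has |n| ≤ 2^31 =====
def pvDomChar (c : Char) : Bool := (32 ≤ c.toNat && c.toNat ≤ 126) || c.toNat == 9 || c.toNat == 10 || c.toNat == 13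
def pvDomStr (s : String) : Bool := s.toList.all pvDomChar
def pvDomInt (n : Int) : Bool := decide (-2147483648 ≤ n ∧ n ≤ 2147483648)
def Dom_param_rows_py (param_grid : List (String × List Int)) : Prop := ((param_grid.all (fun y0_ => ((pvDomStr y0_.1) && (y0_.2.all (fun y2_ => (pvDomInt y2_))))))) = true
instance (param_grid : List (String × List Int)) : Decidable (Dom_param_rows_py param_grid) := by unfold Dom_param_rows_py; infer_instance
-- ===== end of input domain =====

-- ===== PORT A =====
-- B replaces A's itertools odometer + filter by a depth-first backtracking search over the
-- keys with subtree pruning on the ema_fast/ema_slow constraint; objective: alternative.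

-- itertools.product(*values): lex-order combinations (literal recursive transcription, exact)
def pvProduct (values : List (List Int)) : List (List Int) :=
  match values with
  | [] => [[]]
  | v :: rest => v.flatMap (fun x => (pvProduct rest).map (fun c => x :: c))

-- params.get(k, d): first match in the assoc list, default d
def pvGetD (params : List (String × Int)) (k : String) (d : Int) : Int :=
  match params.find? (fun kv => kv.1 == k) with
  | some kv => kv.2
  | none => d

def param_rows_py (param_grid : List (String × List Int)) : List (List (String × Int)) :=
  let keys := param_grid.map (fun kv => kv.1)
  let values := param_grid.map (fun kv => kv.2)
  (pvProduct values).foldl (fun acc combo =>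
    let params := List.zip keys combo
    if pvGetD params "ema_fast" 0 >= pvGetD params "ema_slow" 0 then acc
    else acc ++ [params]) []

-- ===== PORT B =====
-- first_bound(pairs, key): first match or None
def pvFirstBound (pairs : List (String × Int)) (key : String) : Option Int :=
  (pairs.find? (fun kv => kv.1 == key)).map (fun kv => kv.2)

-- search(i, bound): recursion over the remaining items, pruning on the bound ema pair
def pvSearch (bound : List (String × Int)) : List (String × List Int) → List (List (String × Int))
  | [] =>
    let f := pvFirstBound bound "ema_fast"
    let s := pvFirstBound bound "ema_slow"
    if (f.getD 0) < (s.getD 0) then [bound] else []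
  | (key, vals) :: rest =>
    vals.flatMap (fun v =>
      let nb := bound ++ [(key, v)]
      match pvFirstBound nb "ema_fast", pvFirstBound nb "ema_slow" with
      | some f, some s => if f >= s then [] else pvSearch nb rest
      | _, _ => pvSearch nb rest)

def param_rows_py_alt (param_grid : List (String × List Int)) : List (List (String × Int)) :=
  pvSearch [] param_grid

-- ===== PRECONDITION & SPEC =====
def Spec_param_rows_py (param_grid : List (String × List Int)) (out : List (List (String × Int))) : Prop := out = param_rows_py_alt param_grid
instance (param_grid : List (String × List Int)) (out : List (List (String × Int))) : Decidable (Spec_param_rows_py param_grid out) := by unfold Spec_param_rows_py; infer_instance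

-- ===== CLAIM (what is proved, stated in full; the proofs are below) =====
def Claim_equal_param_rows_py : Prop := ∀ (param_grid : List (String × List Int)), Dom_param_rows_py param_grid → Spec_param_rows_py param_grid (param_rows_py param_grid)

-- ===== LEMMAS AND PROOFS =====

def pvPred (params : List (String × Int)) : Bool :=
  decide (pvGetD params "ema_fast" 0 < pvGetD params "ema_slow" 0)

-- A's combination list, written as product-then-zip
def pvCombos (g : List (String × List Int)) : List (List (String × Int)) :=
  (pvProduct (g.map (fun kv => kv.2))).map
    (fun c => List.zip (g.map (fun kv => kv.1)) c)

lemma pvCombos_cons (k : String) (vs : List Int) (rest : List (String × List Int)) :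
    pvCombos ((k, vs) :: rest) =
      vs.flatMap (fun v => (pvCombos rest).map (fun q => (k, v) :: q)) := by
  simp [pvCombos, pvProduct, List.map_flatMap, List.map_map, Function.comp_def]

-- a first-match binding is stable under appending more pairs
lemma pvFirstBound_append (p q : List (String × Int)) (k : String) (x : Int)
    (h : pvFirstBound p k = some x) : pvGetD (p ++ q) k 0 = x := by
  unfold pvFirstBound at h
  unfold pvGetD
  rw [List.find?_append]
  cases hf : p.find? (fun kv => kv.1 == k) with
  | none => simp [hf] at h
  | some kv => simp [hf] at h ⊢; omega

-- the backtracking search computes the filtered extensions of the current bound list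
lemma pvSearch_eq (g : List (String × List Int)) (bound : List (String × Int)) :
    pvSearch bound g = ((pvCombos g).map (fun q => bound ++ q)).filter pvPred := by
  induction g generalizing bound with
  | nil =>
    simp only [pvCombos, pvProduct, List.map_cons, List.map_nil, List.zip_nil_left,
      List.append_nil]
    show pvSearch bound [] = List.filter pvPred [bound]
    unfold pvSearch pvPred
    have hf : pvGetD bound "ema_fast" 0 = (pvFirstBound bound "ema_fast").getD 0 := by
      unfold pvGetD pvFirstBound; cases bound.find? (fun kv => kv.1 == "ema_fast") <;> simp
    have hs : pvGetD bound "ema_slow" 0 = (pvFirstBound bound "ema_slow").getD 0 := by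
      unfold pvGetD pvFirstBound; cases bound.find? (fun kv => kv.1 == "ema_slow") <;> simp
    rw [List.filter_cons, List.filter_nil]
    simp only [hf, hs]
    by_cases h : (pvFirstBound bound "ema_fast").getD 0 < (pvFirstBound bound "ema_slow").getD 0 <;>
      simp [h]
  | cons kv rest ih =>
    obtain ⟨k, vs⟩ := kv
    rw [pvCombos_cons]
    simp only [pvSearch, List.map_flatMap, List.filter_flatMap, List.map_map,
      Function.comp_def]
    congr 1
    funext v
    have hfun : (fun q => bound ++ (k, v) :: q)
        = (fun q : List (String × Int) => (bound ++ [(k, v)]) ++ q) := by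
      funext q; simp
    cases hf : pvFirstBound (bound ++ [(k, v)]) "ema_fast" with
    | none => rw [hfun, ih]
    | some f =>
      cases hs : pvFirstBound (bound ++ [(k, v)]) "ema_slow" with
      | none => rw [hfun, ih]
      | some s =>
        by_cases hge : f >= s
        · simp only [hge, if_pos]
          symm
          rw [List.filter_eq_nil_iff]
          intro x hx
          simp only [List.mem_map] at hx
          obtain ⟨q, _, rfl⟩ := hx
          rw [show bound ++ (k, v) :: q = (bound ++ [(k, v)]) ++ q by simp]
          simp only [pvPred, pvFirstBound_append _ _ _ _ hf,
            pvFirstBound_append _ _ _ _ hs, decide_eq_true_eq]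
          omega
        · rw [hfun, ← ih]
          simp [hge]

lemma pvFilter_ge (L : List (List (String × Int))) (acc : List (List (String × Int))) :
    L.foldl (fun acc params =>
        if pvGetD params "ema_fast" 0 >= pvGetD params "ema_slow" 0 then acc
        else acc ++ [params]) acc
      = acc ++ L.filter pvPred := by
  induction L generalizing acc with
  | nil => simp
  | cons p L ih =>
    by_cases h : pvGetD p "ema_fast" 0 >= pvGetD p "ema_slow" 0
    · simp [ih, h, pvPred, not_lt.mpr h, List.filter]
    · simp [ih, h, pvPred, lt_of_not_ge h, List.filter]

-- A's loop, rewritten as a fold over its zipped combination list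
lemma pvA_eq (g : List (String × List Int)) :
    param_rows_py g = (pvCombos g).foldl (fun acc params =>
      if pvGetD params "ema_fast" 0 >= pvGetD params "ema_slow" 0 then acc
      else acc ++ [params]) [] := by
  unfold param_rows_py pvCombos
  rw [List.foldl_map]


-- ===== VERDICT (by name: the statement is the Claim_ definition above) =====
theorem param_rows_py_spec : Claim_equal_param_rows_py := by
  intro g _
  unfold Spec_param_rows_py
  rw [pvA_eq, pvFilter_ge, List.nil_append]
  unfold param_rows_py_alt
  rw [pvSearch_eq]
  simp
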